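-- pv_equiv track=rewrite | github.com/mandosclaw/swarmpulse-results | missions/oss-supply-chain-compromise-monitor/typosquatting-detector.py | _check_transposition
-- ===== SOURCE A (Python) =====
-- def _check_transposition(suspicious: str, legitimate: str) -> bool:
--     """Check if suspicious is legitimate with adjacent characters swapped."""
--     sus_lower = suspicious.lower()
--     leg_lower = legitimate.lower()
--
--     if len(sus_lower) != len(leg_lower):
--         return False
--
--     # Try swapping each adjacent pair
--     for i in range(len(sus_lower) - 1):
--         swapped = sus_lower[:i] + sus_lower[i+1] + sus_lower[i] + sus_lower[i+2:]
--         if swapped == leg_lower: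
--             return True
--     return False
-- ===== SOURCE B (Python) =====
-- def _check_transposition(suspicious: str, legitimate: str) -> bool:
--     """Check if suspicious is legitimate with adjacent characters swapped.
--
--     Single pass: collect mismatch positions instead of trying every swap."""
--     s = suspicious.lower()
--     t = legitimate.lower()
--     if len(s) != len(t):
--         return False
--     diffs = [(i, a, b) for i, (a, b) in enumerate(zip(s, t)) if a != b]
--     if not diffs:
--         # equal strings: a swap of two equal adjacent characters is a no-op
--         return any(a == b for a, b in zip(s, s[1:]))
--     if len(diffs) != 2:
--         return False
--     (i, a, b), (j, c, d) = diffs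
--     return j == i + 1 and a == d and c == b
-- ===== Notes on version B (the rewrite author's own statement) =====
-- stated objective: faster
-- what changed: A tries every adjacent swap, rebuilding and comparing a full copy of the string for each position; B makes a single pass collecting the mismatch positions of the two lowered strings and decides from that list (no mismatch: any adjacent equal pair; exactly two adjacent mismatches with crossed characters: true; otherwise false).
import Mathlib
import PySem

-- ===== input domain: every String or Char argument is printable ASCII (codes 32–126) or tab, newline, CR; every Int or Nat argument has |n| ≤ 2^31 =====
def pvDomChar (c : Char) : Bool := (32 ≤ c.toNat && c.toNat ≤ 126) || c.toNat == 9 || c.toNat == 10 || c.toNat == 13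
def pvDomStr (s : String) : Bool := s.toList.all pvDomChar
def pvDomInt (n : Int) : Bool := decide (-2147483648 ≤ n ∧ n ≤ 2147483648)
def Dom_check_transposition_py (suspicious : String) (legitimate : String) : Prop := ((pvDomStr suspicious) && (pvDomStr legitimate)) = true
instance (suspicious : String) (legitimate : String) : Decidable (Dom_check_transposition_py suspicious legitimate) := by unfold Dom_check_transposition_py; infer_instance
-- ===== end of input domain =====

-- B replaces A's try-every-adjacent-swap loop by a single pass collecting mismatch positions (objective: faster).


-- ===== PORT A =====
-- swapped = sus_lower[:i] + sus_lower[i+1] + sus_lower[i] + sus_lower[i+2:]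
-- sus_lower[i+1] / sus_lower[i] are single-character indexings; Option.toList renders the
-- character (inside A's loop i+1 < len always holds, so pyGet? is never none and this is exact).
def pvSwappedA (s : List Char) (i : Nat) : List Char :=
  PySem.List.slice s none (some (i : Int)) ++
  (PySem.List.pyGet? s ((i : Int) + 1)).toList ++
  (PySem.List.pyGet? s (i : Int)).toList ++
  PySem.List.slice s (some ((i : Int) + 2)) none

-- for i in range(len(sus_lower) - 1): if swapped == leg_lower: return True / return False
def pvCheckA (s t : List Char) : Bool :=
  if s.length ≠ t.length then false
  else (List.range (s.length - 1)).any (fun i => pvSwappedA s i == t)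

def check_transposition_py (suspicious : String) (legitimate : String) : Bool :=
  pvCheckA (PySem.Chars.lower suspicious.toList) (PySem.Chars.lower legitimate.toList)

-- ===== PORT B =====
-- diffs = [(i, a, b) for i, (a, b) in enumerate(zip(s, t)) if a != b]
def pvDiffs (s t : List Char) : List ((Char × Char) × Nat) :=
  (s.zip t).zipIdx.filter (fun p => p.1.1 != p.1.2)

-- the three-way case split on diffs at the end of B
def pvDecide (s : List Char) : List ((Char × Char) × Nat) → Bool
  | [] => (s.zip s.tail).any (fun p => p.1 == p.2)   -- equal strings: swapping equal adjacent chars is a no-op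
  | [((a, b), i), ((c, d), j)] => j == i + 1 && a == d && c == b
  | _ => false

def pvCheckB (s t : List Char) : Bool :=
  if s.length ≠ t.length then false
  else pvDecide s (pvDiffs s t)

def check_transposition_py_alt (suspicious : String) (legitimate : String) : Bool :=
  pvCheckB (PySem.Chars.lower suspicious.toList) (PySem.Chars.lower legitimate.toList)

-- ===== PRECONDITION & SPEC =====
def Spec_check_transposition_py (suspicious : String) (legitimate : String) (out : Bool) : Prop := out = check_transposition_py_alt suspicious legitimate
instance (suspicious : String) (legitimate : String) (out : Bool) : Decidable (Spec_check_transposition_py suspicious legitimate out) := by unfold Spec_check_transposition_py; infer_instance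

-- ===== CLAIM (what is proved, stated in full; the proofs are below) =====
def Claim_equal_check_transposition_py : Prop := ∀ (suspicious : String) (legitimate : String), Dom_check_transposition_py suspicious legitimate → Spec_check_transposition_py suspicious legitimate (check_transposition_py suspicious legitimate)

-- ===== LEMMAS AND PROOFS =====

-- pvSwappedA in take/cons/drop normal form
lemma pvSwappedA_eq (s : List Char) (i : Nat) (hi : i + 1 < s.length) :
    pvSwappedA s i = s.take i ++ s[i + 1] :: s[i] :: s.drop (i + 2) := by
  have h1 : ((i : Int) + 1) = ((i + 1 : Nat) : Int) := by push_cast; ring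
  have h2 : ((i : Int) + 2) = ((i + 2 : Nat) : Int) := by push_cast; ring
  rw [pvSwappedA, h1, h2, PySem.List.slice_to_natCast, PySem.List.slice_from_natCast,
    PySem.List.pyGet?_natCast, PySem.List.pyGet?_natCast,
    List.getElem?_eq_getElem hi, List.getElem?_eq_getElem (by omega : i < s.length)]
  simp

-- elementwise view of the swapped list
lemma pvSwappedA_getElem? (s : List Char) (i j : Nat) (hi : i + 1 < s.length) :
    (s.take i ++ s[i + 1] :: s[i] :: s.drop (i + 2))[j]? =
      if j = i then s[i + 1]? else if j = i + 1 then s[i]? else s[j]? := by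
  have hti : (s.take i).length = i := by simp; omega
  rcases lt_trichotomy j i with hj | hj | hj
  · rw [List.getElem?_append_left (by rw [hti]; omega)]
    rw [if_neg (by omega), if_neg (by omega), List.getElem?_take_of_lt hj]
  · subst hj
    rw [List.getElem?_append_right (by rw [hti])]
    rw [hti, Nat.sub_self, if_pos rfl]
    simp [List.getElem?_eq_getElem hi]
  · rw [List.getElem?_append_right (by rw [hti]; omega), hti]
    rw [if_neg (by omega)]
    rcases Nat.lt_or_ge j (i + 2) with hj2 | hj2
    · have hj1 : j = i + 1 := by omega
      subst hj1
      rw [if_pos rfl]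
      simp [List.getElem?_eq_getElem (by omega : i < s.length)]
    · rw [if_neg (by omega)]
      have h3 : j - i = (j - i - 2) + 1 + 1 := by omega
      rw [h3]
      simp only [List.getElem?_cons_succ, List.getElem?_drop]
      congr 1
      omega

-- the swap at i equals t iff everything outside {i, i+1} agrees and the pair is crossed
lemma pvSwappedA_eq_iff (s t : List Char) (i : Nat) (_hl : s.length = t.length)
    (hi : i + 1 < s.length) :
    (pvSwappedA s i = t) ↔
      ((∀ j, j ≠ i → j ≠ i + 1 → s[j]? = t[j]?) ∧ t[i]? = s[i + 1]? ∧ t[i + 1]? = s[i]?) := by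
  rw [pvSwappedA_eq s i hi]
  constructor
  · intro h
    refine ⟨fun j hj1 hj2 => ?_, ?_, ?_⟩
    · rw [← h, pvSwappedA_getElem? s i j hi, if_neg hj1, if_neg hj2]
    · rw [← h, pvSwappedA_getElem? s i i hi, if_pos rfl]
    · rw [← h, pvSwappedA_getElem? s i (i + 1) hi, if_neg (by omega), if_pos rfl]
  · rintro ⟨h1, h2, h3⟩
    apply List.ext_getElem?
    intro j
    rw [pvSwappedA_getElem? s i j hi]
    split_ifs with c1 c2
    · subst c1; exact h2.symm
    · subst c2; exact h3.symm
    · exact h1 j c1 c2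

-- membership in the mismatch list
lemma mem_pvDiffs {s t : List Char} {a b : Char} {k : Nat} :
    ((a, b), k) ∈ pvDiffs s t ↔ (s[k]? = some a ∧ t[k]? = some b ∧ a ≠ b) := by
  simp [pvDiffs, List.mem_filter, List.mk_mem_zipIdx_iff_getElem?,
    List.getElem?_zip_eq_some, and_assoc]

-- if no mismatch entry mentions k, the lists agree at k (lengths equal)
lemma agree_of_not_mem_pvDiffs {s t : List Char} (hl : s.length = t.length) (k : Nat)
    (h : ∀ a b, ((a, b), k) ∉ pvDiffs s t) : s[k]? = t[k]? := by
  rcases Nat.lt_or_ge k s.length with hk | hk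
  · have hk' : k < t.length := by omega
    by_contra hne
    have hmem := h (s[k]'hk) (t[k]'hk')
    rw [mem_pvDiffs] at hmem
    simp only [List.getElem?_eq_getElem, hk, hk', not_and, ne_eq, not_not] at hmem
    exact hne (by rw [List.getElem?_eq_getElem hk, List.getElem?_eq_getElem hk',
      hmem trivial trivial])
  · rw [List.getElem?_eq_none (by omega), List.getElem?_eq_none (by omega)]

-- the mismatch indices appear in strictly increasing order
lemma zipIdx_pairwise {α : Type} (l : List α) (k : Nat) :
    (l.zipIdx k).Pairwise (fun x y => x.2 < y.2) := by
  induction l generalizing k with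
  | nil => simp
  | cons a l ih =>
    rw [List.zipIdx_cons]
    refine List.Pairwise.cons ?_ (ih (k + 1))
    intro y hy
    have := List.mem_zipIdx hy
    simp only
    omega

lemma pvDiffs_pairwise (s t : List Char) :
    (pvDiffs s t).Pairwise (fun x y => x.2 < y.2) :=
  (zipIdx_pairwise (s.zip t) 0).sublist List.filter_sublist

-- main list-level equivalence
lemma pvCheck_eq (s t : List Char) : pvCheckA s t = pvCheckB s t := by
  unfold pvCheckA pvCheckB
  by_cases hl : s.length = t.length
  · rw [if_neg (by omega), if_neg (by omega)]
    have hA : ((List.range (s.length - 1)).any (fun i => pvSwappedA s i == t)) = true ↔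
        ∃ i, i + 1 < s.length ∧ pvSwappedA s i = t := by
      simp only [List.any_eq_true, List.mem_range, beq_iff_eq]
      constructor
      · rintro ⟨i, hi, h⟩; exact ⟨i, by omega, h⟩
      · rintro ⟨i, hi, h⟩; exact ⟨i, by omega, h⟩
    rcases hD : pvDiffs s t with _ | ⟨⟨⟨a, b⟩, k⟩, _ | ⟨⟨⟨c, d⟩, m⟩, _ | ⟨⟨⟨e, f⟩, r⟩, rest⟩⟩⟩
    -- no mismatch: the strings are equal
    · have hst : s = t := by
        apply List.ext_getElem?
        intro j
        exact agree_of_not_mem_pvDiffs hl j (fun a b h => by rw [hD] at h; simp at h)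
      subst hst
      rw [Bool.eq_iff_iff, hA]
      show _ ↔ ((s.zip s.tail).any (fun p => p.1 == p.2)) = true
      simp only [List.any_eq_true]
      constructor
      · rintro ⟨i, hi, h⟩
        rw [pvSwappedA_eq_iff s s i rfl hi] at h
        refine ⟨(s[i]'(by omega), s[i + 1]'hi), ?_, ?_⟩
        · rw [List.mem_iff_getElem?]
          refine ⟨i, ?_⟩
          rw [List.getElem?_zip_eq_some]
          constructor
          · exact List.getElem?_eq_getElem (by omega)
          · rw [List.getElem?_tail]
            exact List.getElem?_eq_getElem hi
        · have h2 := h.2.1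
          rw [List.getElem?_eq_getElem (show i < s.length by omega),
            List.getElem?_eq_getElem hi] at h2
          simpa using Option.some.inj h2
      · rintro ⟨⟨x, y⟩, hmem, hxy⟩
        rw [List.mem_iff_getElem?] at hmem
        obtain ⟨i, hi⟩ := hmem
        rw [List.getElem?_zip_eq_some] at hi
        have hx := hi.1
        have hy := hi.2
        rw [List.getElem?_tail] at hy
        have hir : i + 1 < s.length := (List.getElem?_eq_some_iff.mp hy).choose
        have hxy' : x = y := by simpa using hxy
        refine ⟨i, hir, ?_⟩
        rw [pvSwappedA_eq_iff s s i rfl hir]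
        subst hxy'
        exact ⟨fun _ _ _ => rfl, by rw [hx, hy], by rw [hx, hy]⟩
    -- one mismatch: neither a swap nor B's pattern can produce it
    · obtain ⟨hsk, htk, hab⟩ := mem_pvDiffs.mp (show ((a, b), k) ∈ pvDiffs s t by rw [hD]; simp)
      show _ = false
      rw [Bool.eq_false_iff]
      intro hT
      obtain ⟨i, hi, hsw⟩ := hA.mp hT
      rw [pvSwappedA_eq_iff s t i hl hi] at hsw
      obtain ⟨hall, h2, h3⟩ := hsw
      have agree : ∀ j, j ≠ k → s[j]? = t[j]? := by
        intro j hj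
        apply agree_of_not_mem_pvDiffs hl
        intro a' b' hmem
        rw [hD] at hmem
        simp only [List.mem_singleton, Prod.mk.injEq] at hmem
        exact hj hmem.2
      by_cases hk1 : k = i
      · subst hk1
        have e1 : s[k + 1]? = t[k + 1]? := agree _ (by omega)
        have e : t[k]? = s[k]? := by rw [h2, e1, h3]
        rw [htk, hsk] at e
        exact hab (Option.some.inj e).symm
      · by_cases hk2 : k = i + 1
        · subst hk2
          have e0 : s[i]? = t[i]? := agree _ (by omega)
          have e : t[i + 1]? = s[i + 1]? := by rw [h3, e0, h2]
          rw [htk, hsk] at e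
          exact hab (Option.some.inj e).symm
        · have e := hall k hk1 hk2
          rw [hsk, htk] at e
          exact hab (Option.some.inj e)
    -- exactly two mismatches
    · obtain ⟨hsk, htk, hab⟩ := mem_pvDiffs.mp (show ((a, b), k) ∈ pvDiffs s t by rw [hD]; simp)
      obtain ⟨hsm, htm, hcd⟩ := mem_pvDiffs.mp (show ((c, d), m) ∈ pvDiffs s t by rw [hD]; simp)
      have hkm : k < m := by
        have hp := pvDiffs_pairwise s t
        rw [hD] at hp
        exact (List.pairwise_cons.mp hp).1 ((c, d), m) (List.mem_cons_self ..)
      show _ = (m == k + 1 && a == d && c == b)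
      rw [Bool.eq_iff_iff, hA]
      simp only [Bool.and_eq_true, beq_iff_eq]
      constructor
      · rintro ⟨i, hi, hsw⟩
        rw [pvSwappedA_eq_iff s t i hl hi] at hsw
        obtain ⟨hall, h2, h3⟩ := hsw
        have hk_in : k = i ∨ k = i + 1 := by
          by_contra h
          rw [not_or] at h
          have e := hall k h.1 h.2
          rw [hsk, htk] at e
          exact hab (Option.some.inj e)
        have hm_in : m = i ∨ m = i + 1 := by
          by_contra h
          rw [not_or] at h
          have e := hall m h.1 h.2
          rw [hsm, htm] at e
          exact hcd (Option.some.inj e)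
        have hki : k = i := by omega
        have hmi : m = i + 1 := by omega
        subst hki; subst hmi
        have ebc : b = c := by
          have := h2
          rw [htk, hsm] at this
          exact Option.some.inj this
        have ead : a = d := by
          have := h3
          rw [htm, hsk] at this
          exact (Option.some.inj this).symm
        exact ⟨⟨rfl, ead⟩, ebc.symm⟩
      · rintro ⟨⟨hm, had⟩, hcb⟩
        subst hm
        have hmlen : k + 1 < s.length := by
          have := (List.getElem?_eq_some_iff.mp hsm).choose
          omega
        refine ⟨k, hmlen, ?_⟩
        rw [pvSwappedA_eq_iff s t k hl hmlen]
        refine ⟨?_, ?_, ?_⟩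
        · intro j hj1 hj2
          apply agree_of_not_mem_pvDiffs hl
          intro a' b' hmem
          rw [hD] at hmem
          simp only [List.mem_cons, Prod.mk.injEq, List.not_mem_nil,
            or_false] at hmem
          rcases hmem with h | h
          · exact hj1 h.2
          · exact hj2 h.2
        · rw [htk, hsm, hcb]
        · rw [htm, hsk, had]
    -- three or more mismatches: no single swap can explain them
    · obtain ⟨hsk, htk, hab⟩ := mem_pvDiffs.mp (show ((a, b), k) ∈ pvDiffs s t by rw [hD]; simp)
      obtain ⟨hsm, htm, hcd⟩ := mem_pvDiffs.mp (show ((c, d), m) ∈ pvDiffs s t by rw [hD]; simp)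
      obtain ⟨hse, hte, hef⟩ := mem_pvDiffs.mp (show ((e, f), r) ∈ pvDiffs s t by rw [hD]; simp)
      have hp := pvDiffs_pairwise s t
      rw [hD] at hp
      have hkm : k < m := (List.pairwise_cons.mp hp).1 ((c, d), m) (List.mem_cons_self ..)
      have hmr : m < r := (List.pairwise_cons.mp (List.pairwise_cons.mp hp).2).1 ((e, f), r) (List.mem_cons_self ..)
      show _ = false
      rw [Bool.eq_false_iff]
      intro hT
      obtain ⟨i, hi, hsw⟩ := hA.mp hT
      rw [pvSwappedA_eq_iff s t i hl hi] at hsw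
      obtain ⟨hall, _, _⟩ := hsw
      have hin : ∀ (j : Nat) (x y : Char), s[j]? = some x → t[j]? = some y → x ≠ y →
          j = i ∨ j = i + 1 := by
        intro j x y hx hy hxy
        by_contra h
        rw [not_or] at h
        have e := hall j h.1 h.2
        rw [hx, hy] at e
        exact hxy (Option.some.inj e)
      have h1 := hin k a b hsk htk hab
      have h2 := hin m c d hsm htm hcd
      have h3 := hin r e f hse hte hef
      omega
  · rw [if_pos (by omega), if_pos (by omega)]

-- ===== VERDICT (by name: the statement is the Claim_ definition above) =====
theorem check_transposition_py_spec : Claim_equal_check_transposition_py := by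
  intro sus leg _
  unfold Spec_check_transposition_py check_transposition_py check_transposition_py_alt
  exact pvCheck_eq _ _
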